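-- pv_equiv track=rewrite | github.com/evgerritz/api | app/scraper/sources/departmental.py | name_matches
-- ===== SOURCE A (Python) =====
-- def name_matches(person, name):
--     names = name.split()
--     for divider in range(1, len(names)):
--         first_name = ' '.join(names[:divider])
--         last_name = ' '.join(names[divider:])
--         if person['first_name'] == first_name and person['last_name'] == last_name:
--             return True
--     return False
-- ===== SOURCE B (Python) =====
-- def name_matches(person, name):
--     names = name.split()
--     if len(names) < 2:
--         return False
--     first = person['first_name']
--     fw = first.split()
--     # the only divider that can reproduce `first` is len(fw), and only if
--     # `first` is already whitespace-normalized
--     if not fw or len(fw) >= len(names) or names[:len(fw)] != fw or ' '.join(fw) != first: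
--         return False
--     return person['last_name'] == ' '.join(names[len(fw):])
-- ===== Notes on version B (the rewrite author's own statement) =====
-- stated objective: alternative
-- what changed: B derives the single possible divider (the word count of person['first_name']) by splitting the stored names and checking that one candidate, instead of A's loop that re-joins the name at every divider position.
import Mathlib
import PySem

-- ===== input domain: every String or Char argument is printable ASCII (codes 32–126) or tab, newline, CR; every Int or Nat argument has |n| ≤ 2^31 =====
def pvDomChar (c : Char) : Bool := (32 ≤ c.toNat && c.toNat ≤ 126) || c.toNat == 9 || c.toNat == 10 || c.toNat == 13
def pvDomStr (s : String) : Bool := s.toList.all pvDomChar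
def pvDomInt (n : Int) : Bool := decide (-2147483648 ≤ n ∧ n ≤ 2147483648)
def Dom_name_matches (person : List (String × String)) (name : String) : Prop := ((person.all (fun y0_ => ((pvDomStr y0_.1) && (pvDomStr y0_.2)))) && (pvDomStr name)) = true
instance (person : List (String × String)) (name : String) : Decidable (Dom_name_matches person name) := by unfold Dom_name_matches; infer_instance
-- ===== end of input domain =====

-- B derives the single candidate divider (the word count of person['first_name'])
-- instead of trying every divider as A does; objective: alternative.

-- ===== PORT A =====
-- A's loop `for divider in range(1, len(names))` with early return True;
-- person['first_name'] / person['last_name'] are dict lookups that raise on a missing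
-- key — excluded by Pre_; the port's `= some _` comparison is then exact.
-- names[:divider] / names[divider:] with divider ≥ 0 are List.take / List.drop (exact).
def nmALoop (person : List (String × String)) (names : List String) (divider : Nat) : Bool :=
  if _h : divider < names.length then
    let first_name := PySem.Str.join " " (names.take divider)
    let last_name := PySem.Str.join " " (names.drop divider)
    if (PySem.Dict.mk person).get? "first_name" = some first_name then
      if (PySem.Dict.mk person).get? "last_name" = some last_name then true
      else nmALoop person names (divider + 1)
    else nmALoop person names (divider + 1)
  else false
termination_by names.length - divider

def name_matches (person : List (String × String)) (name : String) : Bool :=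
  let names := PySem.Str.split₀ name
  nmALoop person names 1

-- ===== PORT B =====
def name_matches_alt (person : List (String × String)) (name : String) : Bool :=
  let names := PySem.Str.split₀ name
  if names.length < 2 then false
  else
    match (PySem.Dict.mk person).get? "first_name" with
    | none => false   -- Python B raises KeyError here (outside Pre_)
    | some first =>
      let fw := PySem.Str.split₀ first
      if fw.isEmpty || decide (names.length ≤ fw.length) || !(names.take fw.length == fw)
         || !(PySem.Str.join " " fw == first) then false
      else
        match (PySem.Dict.mk person).get? "last_name" with
        | none => false   -- Python B raises KeyError here (outside Pre_)
        | some last => last == PySem.Str.join " " (names.drop fw.length)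

-- ===== PRECONDITION & SPEC =====
-- Pre_ excludes exactly the inputs on which A raises a KeyError: 'first_name' missing while
-- the name has ≥ 2 words, or 'last_name' missing while some divider matches 'first_name'
-- (Python's `and` only reaches person['last_name'] in that case).  B raises there too.
def Pre_name_matches (person : List (String × String)) (name : String) : Prop :=
  (PySem.Str.split₀ name).length < 2 ∨
    (((PySem.Dict.mk person).get? "first_name").isSome ∧
      ((∃ d ∈ List.range (PySem.Str.split₀ name).length, 1 ≤ d ∧
          (PySem.Dict.mk person).get? "first_name" = some (PySem.Str.join " " ((PySem.Str.split₀ name).take d))) →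
        ((PySem.Dict.mk person).get? "last_name").isSome))
instance (person : List (String × String)) (name : String) : Decidable (Pre_name_matches person name) := by unfold Pre_name_matches; infer_instance

def pvWitness_name_matches : (List (String × String)) × String :=
  ([("first_name", "Mary Ann"), ("last_name", "Smith")], "Mary Ann Smith")

def Spec_name_matches (person : List (String × String)) (name : String) (out : Bool) : Prop := out = name_matches_alt person name
instance (person : List (String × String)) (name : String) (out : Bool) : Decidable (Spec_name_matches person name out) := by unfold Spec_name_matches; infer_instance

-- ===== CLAIM (what is proved, stated in full; the proofs are below) =====
def Claim_equal_name_matches : Prop := ∀ (person : List (String × String)) (name : String), Dom_name_matches person name → Pre_name_matches person name → Spec_name_matches person name (name_matches person name)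

-- ===== LEMMAS AND PROOFS =====

-- a "word": nonempty and free of whitespace characters
def pvGoodWord (w : List Char) : Prop := w ≠ [] ∧ ∀ c ∈ w, PySem.Chars.isspace c = false

theorem goodWord_go (s cur : List Char) (acc : List (List Char))
    (hacc : ∀ w ∈ acc, pvGoodWord w) (hcur : ∀ c ∈ cur, PySem.Chars.isspace c = false) :
    ∀ w ∈ PySem.Chars.split₀.go s cur acc, pvGoodWord w := by
  induction s generalizing cur acc with
  | nil =>
    intro w hw
    unfold PySem.Chars.split₀.go at hw
    by_cases h : cur = []
    · simp [h] at hw; exact hacc _ hw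
    · simp [h, List.mem_reverse] at hw
      rcases hw with hw | hw
      · exact hacc _ hw
      · subst hw
        refine ⟨by simpa using h, ?_⟩
        intro c hc; exact hcur c (List.mem_reverse.mp hc)
  | cons c rest ih =>
    intro w hw
    unfold PySem.Chars.split₀.go at hw
    by_cases hsp : PySem.Chars.isspace c = true
    · by_cases hce : cur = []
      · simp [hsp, hce] at hw
        exact ih [] acc hacc (by simp) w hw
      · simp [hsp, hce] at hw
        refine ih [] (cur.reverse :: acc) ?_ (by simp) w hw
        intro v hv
        rcases List.mem_cons.mp hv with hv | hv
        · subst hv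
          refine ⟨by simpa using hce, ?_⟩
          intro x hx; exact hcur x (List.mem_reverse.mp hx)
        · exact hacc _ hv
    · simp [hsp] at hw
      refine ih (c :: cur) acc hacc ?_ w hw
      intro x hx
      rcases List.mem_cons.mp hx with hx | hx
      · subst hx; simpa using hsp
      · exact hcur x hx

theorem goodWord_split₀ (s : List Char) : ∀ w ∈ PySem.Chars.split₀ s, pvGoodWord w := by
  unfold PySem.Chars.split₀
  exact goodWord_go s [] [] (by simp) (by simp)

-- scanning a whitespace-free word just accumulates it
theorem go_word (w : List Char) (hw : ∀ c ∈ w, PySem.Chars.isspace c = false) :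
    ∀ (s cur : List Char) (acc : List (List Char)),
      PySem.Chars.split₀.go (w ++ s) cur acc = PySem.Chars.split₀.go s (w.reverse ++ cur) acc := by
  induction w with
  | nil => intro s cur acc; simp
  | cons c t ih =>
    intro s cur acc
    have hc : PySem.Chars.isspace c = false := hw c (by simp)
    have ht : ∀ x ∈ t, PySem.Chars.isspace x = false := fun x hx => hw x (by simp [hx])
    rw [List.cons_append]
    conv_lhs => unfold PySem.Chars.split₀.go
    simp only [hc, Bool.false_eq_true, if_false]
    rw [ih ht s (c :: cur) acc]
    simp

-- splitting the single-space join of words recovers the words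
theorem split₀_go_join (ws : List (List Char)) (h : ∀ w ∈ ws, pvGoodWord w) :
    ∀ acc : List (List Char),
      PySem.Chars.split₀.go ([' '].intercalate ws) [] acc = acc.reverse ++ ws := by
  induction ws with
  | nil =>
    intro acc
    unfold PySem.Chars.split₀.go
    simp [List.intercalate]
  | cons w ws ih =>
    intro acc
    have hwgood := h w (by simp)
    have hws : ∀ v ∈ ws, pvGoodWord v := fun v hv => h v (by simp [hv])
    cases ws with
    | nil =>
      have h1 : [' '].intercalate [w] = w ++ [] := by simp [List.intercalate]
      rw [h1, go_word w hwgood.2 [] [] acc]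
      unfold PySem.Chars.split₀.go
      simp [hwgood.1]
    | cons v vs =>
      have hint : [' '].intercalate (w :: v :: vs) = w ++ ' ' :: [' '].intercalate (v :: vs) := by
        simp [List.intercalate, List.intersperse]
      rw [hint, go_word w hwgood.2 _ [] acc]
      conv_lhs => unfold PySem.Chars.split₀.go
      have hsp : PySem.Chars.isspace ' ' = true := by decide
      rw [if_pos hsp, if_neg (by simp [hwgood.1]), ih hws]
      simp

theorem split₀_join (ws : List (List Char)) (h : ∀ w ∈ ws, pvGoodWord w) :
    PySem.Chars.split₀ (PySem.Chars.join [' '] ws) = ws := by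
  unfold PySem.Chars.split₀ PySem.Chars.join
  simpa using split₀_go_join ws h []

-- Str-level: joining words of split₀-shape with " " and splitting again is the identity
theorem str_split₀_join (ws : List String) (h : ∀ w ∈ ws, pvGoodWord w.toList) :
    PySem.Str.split₀ (PySem.Str.join " " ws) = ws := by
  have hmap : List.map String.toList (PySem.Str.split₀ (PySem.Str.join " " ws))
      = List.map String.toList ws := by
    rw [PySem.Str.split₀_map_toList, PySem.Str.toList_join]
    have : (" " : String).toList = [' '] := rfl
    rw [this, split₀_join (ws.map String.toList) (by
      intro w hw
      rcases List.mem_map.mp hw with ⟨v, hv, rfl⟩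
      exact h v hv)]
  exact List.map_injective_iff.mpr (fun a b hab => String.toList_inj.mp hab) hmap

theorem goodWord_str_split₀ (s : String) : ∀ w ∈ PySem.Str.split₀ s, pvGoodWord w.toList := by
  intro w hw
  apply goodWord_split₀ s.toList
  rw [← PySem.Str.split₀_map_toList]
  exact List.mem_map.mpr ⟨w, hw, rfl⟩

-- the key characterization: for 1 ≤ d ≤ len names, the join of the first d words equals F
-- iff F splits back to exactly those d words and F is whitespace-normalized
theorem join_take_eq_iff (names : List String) (hg : ∀ w ∈ names, pvGoodWord w.toList)
    (d : Nat) (F : String) :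
    PySem.Str.join " " (names.take d) = F ↔
      (PySem.Str.split₀ F = names.take d ∧ PySem.Str.join " " (PySem.Str.split₀ F) = F) := by
  constructor
  · intro hF
    have hsplit : PySem.Str.split₀ F = names.take d := by
      rw [← hF, str_split₀_join (names.take d) (fun w hw => hg w (List.mem_of_mem_take hw))]
    exact ⟨hsplit, by rw [hsplit]; exact hF⟩
  · rintro ⟨h1, h2⟩
    rw [← h1]; exact h2

-- characterization of A's loop
theorem nmALoop_eq_true_iff (person : List (String × String)) (names : List String) (d : Nat) :
    nmALoop person names d = true ↔
      ∃ k, d ≤ k ∧ k < names.length ∧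
        (PySem.Dict.mk person).get? "first_name" = some (PySem.Str.join " " (names.take k)) ∧
        (PySem.Dict.mk person).get? "last_name" = some (PySem.Str.join " " (names.drop k)) := by
  generalize hfuel : names.length - d = n
  induction n generalizing d with
  | zero =>
    unfold nmALoop
    have h : ¬ d < names.length := by omega
    simp only [h, dif_neg, not_false_iff]
    constructor
    · intro hfalse; exact absurd hfalse (by simp)
    · rintro ⟨k, hk1, hk2, _⟩; omega
  | succ n ih =>
    have hlt : d < names.length := by omega
    unfold nmALoop
    simp only [hlt, dif_pos]
    have hrec := ih (d + 1) (by omega)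
    split_ifs with hF hL
    · constructor
      · intro _; exact ⟨d, le_refl d, hlt, hF, hL⟩
      · intro _; rfl
    · rw [hrec]
      constructor
      · rintro ⟨k, hk1, hk2, hk3, hk4⟩; exact ⟨k, by omega, hk2, hk3, hk4⟩
      · rintro ⟨k, hk1, hk2, hk3, hk4⟩
        refine ⟨k, ?_, hk2, hk3, hk4⟩
        rcases Nat.lt_or_ge d k with h | h
        · omega
        · exfalso; have : k = d := by omega
          subst this; exact hL hk4
    · rw [hrec]
      constructor
      · rintro ⟨k, hk1, hk2, hk3, hk4⟩; exact ⟨k, by omega, hk2, hk3, hk4⟩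
      · rintro ⟨k, hk1, hk2, hk3, hk4⟩
        refine ⟨k, ?_, hk2, hk3, hk4⟩
        rcases Nat.lt_or_ge d k with h | h
        · omega
        · exfalso; have : k = d := by omega
          subst this; exact hF hk3

-- A's loop returns false when the iff's right side fails
theorem nmALoop_eq_false (person : List (String × String)) (names : List String) (d : Nat)
    (h : ¬ ∃ k, d ≤ k ∧ k < names.length ∧
        (PySem.Dict.mk person).get? "first_name" = some (PySem.Str.join " " (names.take k)) ∧
        (PySem.Dict.mk person).get? "last_name" = some (PySem.Str.join " " (names.drop k))) :
    nmALoop person names d = false := by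
  rcases Bool.eq_false_or_eq_true (nmALoop person names d) with hb | hb
  · exact absurd ((nmALoop_eq_true_iff person names d).mp hb) h
  · exact hb

-- if the join of the first k words (k ≤ len) equals F, then k is the word count of F
theorem match_divider_unique (names : List String) (hg : ∀ w ∈ names, pvGoodWord w.toList)
    (k : Nat) (hk : k ≤ names.length) (F : String)
    (h : PySem.Str.join " " (names.take k) = F) : k = (PySem.Str.split₀ F).length := by
  have := (join_take_eq_iff names hg k F).mp h
  rw [this.1, List.length_take]
  omega

-- ===== VERDICT (by name: the statement is the Claim_ definition above) =====
theorem name_matches_spec : Claim_equal_name_matches := by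
  intro person name _hdom hpre
  unfold Spec_name_matches
  unfold Pre_name_matches at hpre
  simp only [name_matches, name_matches_alt]
  set names := PySem.Str.split₀ name with hnames
  have hg : ∀ w ∈ names, pvGoodWord w.toList := goodWord_str_split₀ name
  by_cases hlen : names.length < 2
  · -- loop body never runs: every divider k has 1 ≤ k < len impossible together with len < 2
    have hA : nmALoop person names 1 = false := by
      apply nmALoop_eq_false
      rintro ⟨k, h1, h2, _⟩; omega
    simp [hA, hlen]
  · simp only [hlen, if_false]
    rcases hpre with h | ⟨hFsome, hLimp⟩
    · omega
    rcases Option.isSome_iff_exists.mp hFsome with ⟨F, hF⟩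
    simp only [hF]
    set fw := PySem.Str.split₀ F with hfw
    by_cases hcond : (fw.isEmpty || decide (names.length ≤ fw.length) || !(names.take fw.length == fw)
         || !(PySem.Str.join " " fw == F)) = true
    · -- B returns false; show A's loop finds no divider
      simp only [hcond, if_true]
      apply nmALoop_eq_false
      rintro ⟨k, hk1, hk2, hk3, _⟩
      have hFk : PySem.Str.join " " (names.take k) = F := by
        rw [hF] at hk3; exact (Option.some_injective _ hk3).symm
      have hiff := (join_take_eq_iff names hg k F).mp hFk
      have hkeq : k = fw.length := by
        rw [hfw, hiff.1, List.length_take]; omega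
      have h1 : fw.isEmpty = false := by
        rw [List.isEmpty_eq_false_iff_exists_mem]
        rcases fw with _ | ⟨a, l⟩
        · exfalso; rw [hkeq] at hk1; simp at hk1
        · exact ⟨a, by simp⟩
      have h2 : ¬ names.length ≤ fw.length := by omega
      have h3 : names.take fw.length == fw := by
        rw [← hkeq, beq_iff_eq, hfw, hiff.1]
      have h4 : PySem.Str.join " " fw == F := by rw [beq_iff_eq, hfw]; exact hiff.2
      simp [h1, h2, h3, h4] at hcond
    · -- B computes the single candidate divider fw.length
      simp only [hcond]
      have h1 : fw.isEmpty = false := by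
        rcases Bool.eq_false_or_eq_true fw.isEmpty with h | h
        · exact absurd (by simp [h]) hcond
        · exact h
      have h2 : ¬ names.length ≤ fw.length := by
        by_contra h
        exact hcond (by simp [h])
      have h3 : names.take fw.length = fw := by
        rcases Bool.eq_false_or_eq_true (names.take fw.length == fw) with h | h
        · exact beq_iff_eq.mp h
        · exact absurd (by simp [h]) hcond
      have h4 : PySem.Str.join " " fw = F := by
        rcases Bool.eq_false_or_eq_true (PySem.Str.join " " fw == F) with h | h
        · exact beq_iff_eq.mp h
        · exact absurd (by simp [h]) hcond
      -- F matches exactly at divider fw.length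
      have hFmatch : PySem.Str.join " " (names.take fw.length) = F := by rw [h3]; exact h4
      have hfwpos : 1 ≤ fw.length := by
        rcases fw with _ | _
        · simp at h1
        · simp
      -- 'last_name' is present by Pre_
      have hLsome : ((PySem.Dict.mk person).get? "last_name").isSome := by
        apply hLimp
        refine ⟨fw.length, List.mem_range.mpr (by omega), hfwpos, ?_⟩
        rw [hF, hFmatch]
      rcases Option.isSome_iff_exists.mp hLsome with ⟨L, hL⟩
      simp only [hL]
      -- A's loop succeeds iff the single candidate succeeds
      rcases Bool.eq_false_or_eq_true (L == PySem.Str.join " " (names.drop fw.length)) with hB | hB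
      swap
      · rw [hB]
        apply nmALoop_eq_false
        rintro ⟨k, hk1, hk2, hk3, hk4⟩
        have hFk : PySem.Str.join " " (names.take k) = F := by
          rw [hF] at hk3; exact (Option.some_injective _ hk3).symm
        have hkeq : k = fw.length :=
          match_divider_unique names hg k (by omega) F hFk
        rw [hkeq, hL] at hk4
        have : L = PySem.Str.join " " (names.drop fw.length) := Option.some_injective _ hk4
        rw [this] at hB; simp at hB
      · rw [hB]
        apply (nmALoop_eq_true_iff person names 1).mpr
        exact ⟨fw.length, hfwpos, by omega, by rw [hF, hFmatch], by rw [hL, beq_iff_eq.mp hB]⟩
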